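-- pv_equiv track=rewrite | github.com/deepgori/inferra | inferra/indexer.py | _route_matches
-- ===== SOURCE A (Python) =====
-- def _route_matches(pattern: str, path: str) -> bool:
--     """Check if a route pattern (with {params}) matches a request path."""
--     pattern_parts = pattern.strip("/").split("/")
--     path_parts = path.strip("/").split("/")
--     if len(pattern_parts) != len(path_parts):
--         return False
--     for pp, rp in zip(pattern_parts, path_parts):
--         if pp.startswith("{") and pp.endswith("}"):
--             continue  # Path parameter — matches anything
--         if pp != rp:
--             return False
--     return True
-- ===== SOURCE B (Python) =====
-- def _route_matches(pattern: str, path: str) -> bool: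
--     """Check if a route pattern (with {params}) matches a request path."""
--     p = pattern.strip("/")
--     r = path.strip("/")
--     while True:
--         pseg, psep, p = p.partition("/")
--         rseg, rsep, r = r.partition("/")
--         if not (pseg.startswith("{") and pseg.endswith("}")) and pseg != rseg:
--             return False
--         if not psep or not rsep:
--             return psep == rsep
-- ===== Notes on version B (the rewrite author's own statement) =====
-- stated objective: alternative
-- what changed: B replaces A's split-into-two-lists + length precheck + zip loop by a single scan that peels one segment off each string per step with str.partition and exits as soon as a segment mismatches or one path runs out.
import Mathlib
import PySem

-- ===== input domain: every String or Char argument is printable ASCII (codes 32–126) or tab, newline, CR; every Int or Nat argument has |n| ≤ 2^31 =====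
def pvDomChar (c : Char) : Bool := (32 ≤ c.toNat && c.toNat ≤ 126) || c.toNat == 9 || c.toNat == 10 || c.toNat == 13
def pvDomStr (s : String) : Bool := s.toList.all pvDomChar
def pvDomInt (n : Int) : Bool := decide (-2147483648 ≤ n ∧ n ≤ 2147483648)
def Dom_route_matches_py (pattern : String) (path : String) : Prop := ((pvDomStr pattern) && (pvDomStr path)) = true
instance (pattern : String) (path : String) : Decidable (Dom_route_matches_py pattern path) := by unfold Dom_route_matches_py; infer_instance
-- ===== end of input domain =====

-- B replaces A's split-into-lists + length check + zip loop by a single scan that peels one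
-- segment off each string with str.partition per step and exits early (objective: alternative).

-- ===== PORT A =====
-- the for-loop over zip(pattern_parts, path_parts) with early `return False`
def routeALoop : List (List Char × List Char) → Bool
  | [] => true
  | (pp, rp) :: rest =>
    if PySem.Chars.startswith pp ['{'] && PySem.Chars.endswith pp ['}'] then
      routeALoop rest
    else if pp ≠ rp then false
    else routeALoop rest

def route_matches_py (pattern : String) (path : String) : Bool :=
  let pattern_parts := PySem.Chars.splitOn (PySem.Chars.stripChars pattern.toList ['/']) ['/']
  let path_parts := PySem.Chars.splitOn (PySem.Chars.stripChars path.toList ['/']) ['/']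
  if pattern_parts.length ≠ path_parts.length then false
  else routeALoop (pattern_parts.zip path_parts)

-- ===== PORT B =====
-- Source B's while-loop: each step is `seg, sep, rest = s.partition("/")` on both strings
-- (partition on a one-char separator is exactly takeWhile / dropWhile on the char list;
-- `sep` is empty iff dropWhile is empty, and `rest` is its tail).
def routeBLoop (p r : List Char) : Bool :=
  if !(PySem.Chars.startswith (p.takeWhile (· ≠ '/')) ['{']
        && PySem.Chars.endswith (p.takeWhile (· ≠ '/')) ['}'])
      && p.takeWhile (· ≠ '/') ≠ r.takeWhile (· ≠ '/') then
    false
  else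
    match hp : p.dropWhile (· ≠ '/'), hr : r.dropWhile (· ≠ '/') with
    | _ :: p', _ :: r' => routeBLoop p' r'
    | ps, rs => ps.isEmpty == rs.isEmpty
termination_by p.length
decreasing_by
  have h1 : (p.dropWhile (· ≠ '/')).length ≤ p.length := p.length_dropWhile_le _
  rw [hp] at h1
  simp at h1
  omega

def route_matches_py_alt (pattern : String) (path : String) : Bool :=
  routeBLoop (PySem.Chars.stripChars pattern.toList ['/']) (PySem.Chars.stripChars path.toList ['/'])

-- ===== PRECONDITION & SPEC =====
def Spec_route_matches_py (pattern : String) (path : String) (out : Bool) : Prop := out = route_matches_py_alt pattern path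
instance (pattern : String) (path : String) (out : Bool) : Decidable (Spec_route_matches_py pattern path out) := by unfold Spec_route_matches_py; infer_instance

-- ===== CLAIM (what is proved, stated in full; the proofs are below) =====
def Claim_equal_route_matches_py : Prop := ∀ (pattern : String) (path : String), Dom_route_matches_py pattern path → Spec_route_matches_py pattern path (route_matches_py pattern path)

-- ===== LEMMAS AND PROOFS =====

-- structural reformulation of Python split on a single-char separator
def mySplit : List Char → List (List Char)
  | [] => [[]]
  | a :: rest => if a = '/' then [] :: mySplit rest else (mySplit rest).modifyHead (a :: ·)

theorem mySplit_ne_nil (l : List Char) : mySplit l ≠ [] := by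
  induction l with
  | nil => simp [mySplit]
  | cons a rest ih =>
    simp only [mySplit]
    split
    · simp
    · cases h : mySplit rest with
      | nil => exact absurd h ih
      | cons b t => simp [List.modifyHead]

theorem splitOn_go_eq (fuel : Nat) (l cur : List Char) (acc : List (List Char))
    (h : l.length ≤ fuel) :
    PySem.Chars.splitOn.go ['/'] fuel l cur acc
      = acc.reverse ++ (mySplit l).modifyHead (cur.reverse ++ ·) := by
  induction fuel generalizing l cur acc with
  | zero =>
    interval_cases hl : l.length
    have : l = [] := List.length_eq_zero_iff.mp hl
    subst this
    simp [PySem.Chars.splitOn.go, mySplit]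
  | succ fuel ih =>
    cases l with
    | nil => simp [PySem.Chars.splitOn.go, mySplit]
    | cons c rest =>
      simp only [List.length_cons] at h
      by_cases hc : c = '/'
      · subst hc
        have hpre : List.isPrefixOf ['/'] ('/' :: rest) = true := by
          simp [List.isPrefixOf]
        simp only [PySem.Chars.splitOn.go, hpre, if_pos]
        rw [show List.drop (['/'] : List Char).length ('/' :: rest) = rest from rfl]
        rw [ih rest [] (cur.reverse :: acc) (by omega)]
        simp [mySplit, List.modifyHead]
        cases hm : mySplit rest with
        | nil => exact absurd hm (mySplit_ne_nil rest)
        | cons a t => simp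
      · have hpre : List.isPrefixOf ['/'] (c :: rest) = false := by
          simp [List.isPrefixOf]
          exact fun he => absurd he.symm hc
        simp only [PySem.Chars.splitOn.go, hpre, Bool.false_eq_true, if_false]
        rw [ih rest (c :: cur) acc (by omega)]
        simp only [mySplit, hc, if_false]
        cases hm : mySplit rest with
        | nil => exact absurd hm (mySplit_ne_nil rest)
        | cons a t => simp [List.modifyHead]

theorem splitOn_eq (s : List Char) : PySem.Chars.splitOn s ['/'] = mySplit s := by
  unfold PySem.Chars.splitOn
  rw [splitOn_go_eq (s.length + 1) s [] [] (by omega)]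
  cases hm : mySplit s with
  | nil => exact absurd hm (mySplit_ne_nil s)
  | cons a t => simp [List.modifyHead]

theorem mySplit_char (s : List Char) :
    mySplit s = s.takeWhile (· ≠ '/') ::
      (match s.dropWhile (· ≠ '/') with
        | [] => []
        | _ :: t => mySplit t) := by
  induction s with
  | nil => simp [mySplit]
  | cons a rest ih =>
    by_cases ha : a = '/'
    · subst ha; simp [mySplit, List.takeWhile, List.dropWhile]
    · simp only [mySplit, ha, if_false, List.takeWhile, List.dropWhile]
      simp only [ne_eq, ha, not_false_eq_true, decide_true]
      rw [ih]
      simp [List.modifyHead]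

-- the core invariant: B's scan computes exactly A's length check + zip loop on mySplit
theorem mySplit_length_pos (l : List Char) : 0 < (mySplit l).length :=
  List.length_pos_iff.mpr (mySplit_ne_nil l)

theorem routeALoop_cons_param (pp rp : List Char) (t : List (List Char × List Char))
    (h1 : (PySem.Chars.startswith pp ['{'] && PySem.Chars.endswith pp ['}']) = true) :
    routeALoop ((pp, rp) :: t) = routeALoop t := by
  simp [routeALoop, h1]

theorem routeALoop_cons_eq (pp : List Char) (t : List (List Char × List Char)) :
    routeALoop ((pp, pp) :: t) = routeALoop t := by
  by_cases hc : (PySem.Chars.startswith pp ['{'] && PySem.Chars.endswith pp ['}']) = true <;>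
    simp [routeALoop, hc]

theorem routeALoop_cons_fail (pp rp : List Char) (t : List (List Char × List Char))
    (h1 : (PySem.Chars.startswith pp ['{'] && PySem.Chars.endswith pp ['}']) = false)
    (h2 : pp ≠ rp) :
    routeALoop ((pp, rp) :: t) = false := by
  simp [routeALoop, h1, h2]

theorem ifLenFalse (a b : List Char) (ta tb : List (List Char))
    (h1 : (PySem.Chars.startswith a ['{'] && PySem.Chars.endswith a ['}']) = false)
    (h2 : a ≠ b) :
    (if (a :: ta).length ≠ (b :: tb).length then false
     else routeALoop ((a :: ta).zip (b :: tb))) = false := by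
  split
  · rfl
  · rw [List.zip_cons_cons]
    exact routeALoop_cons_fail _ _ _ h1 h2

-- the core invariant: B's scan computes exactly A's length check + zip loop on mySplit
theorem routeBLoop_eq (p r : List Char) :
    routeBLoop p r =
      (if (mySplit p).length ≠ (mySplit r).length then false
       else routeALoop ((mySplit p).zip (mySplit r))) := by
  have hdisj : ∀ p r : List Char,
      ¬(!(PySem.Chars.startswith (p.takeWhile (· ≠ '/')) ['{']
            && PySem.Chars.endswith (p.takeWhile (· ≠ '/')) ['}'])
          && p.takeWhile (· ≠ '/') ≠ r.takeWhile (· ≠ '/')) = true →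
      (PySem.Chars.startswith (p.takeWhile (· ≠ '/')) ['{']
          && PySem.Chars.endswith (p.takeWhile (· ≠ '/')) ['}']) = true
        ∨ p.takeWhile (· ≠ '/') = r.takeWhile (· ≠ '/') := by
    intro p r h
    rcases Bool.and_eq_false_iff.mp (Bool.of_not_eq_true h) with hx | hx
    · exact Or.inl (by simpa using hx)
    · exact Or.inr (by simpa using of_decide_eq_false hx)
  fun_induction routeBLoop p r with
  | case1 p r h =>
    rw [Bool.and_eq_true, Bool.not_eq_true', decide_eq_true_eq] at h
    obtain ⟨h1, h2⟩ := h
    rw [mySplit_char p, mySplit_char r]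
    exact (ifLenFalse _ _ _ _ h1 h2).symm
  | case2 p r h c1 p' c2 r' hp hr ih =>
    rw [ih, mySplit_char p, mySplit_char r, hp, hr]
    by_cases hl : (mySplit p').length = (mySplit r').length
    · rw [if_neg (by simpa using hl), if_neg (by simp [hl])]
      rcases hdisj p r h with hx | hx
      · exact (routeALoop_cons_param _ _ _ hx).symm
      · rw [hx]
        exact (routeALoop_cons_eq _ _).symm
    · rw [if_pos hl, if_pos (by simpa using hl)]
  | case3 p r h hnc =>
    rw [mySplit_char p, mySplit_char r]
    cases hp : p.dropWhile (· ≠ '/') with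
    | nil =>
      cases hr : r.dropWhile (· ≠ '/') with
      | nil =>
        dsimp only
        have hA : routeALoop
            ((p.takeWhile (· ≠ '/'), r.takeWhile (· ≠ '/')) :: ([] : List (List Char × List Char)))
            = true := by
          rcases hdisj p r h with hx | hx
          · exact (routeALoop_cons_param _ _ _ hx).trans rfl
          · rw [hx]
            exact (routeALoop_cons_eq _ _).trans rfl
        rw [if_neg (by simp)]
        rw [List.zip_cons_cons]
        simpa using hA.symm
      | cons c2 r' =>
        dsimp only
        rw [if_pos (by have := mySplit_length_pos r'; simp only [List.length_cons,
          List.length_nil]; omega)]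
        simp
    | cons c1 p' =>
      cases hr : r.dropWhile (· ≠ '/') with
      | nil =>
        dsimp only
        rw [if_pos (by have := mySplit_length_pos p'; simp only [List.length_cons,
          List.length_nil]; omega)]
        simp
      | cons c2 r' => exact (hnc c1 p' c2 r' hp hr).elim

-- ===== VERDICT (by name: the statement is the Claim_ definition above) =====
theorem route_matches_py_spec : Claim_equal_route_matches_py := by
  intro pattern path _
  unfold Spec_route_matches_py route_matches_py route_matches_py_alt
  simp only [splitOn_eq]
  rw [routeBLoop_eq]
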